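-- pv_equiv track=rewrite | github.com/AyushAgnihotri2025/CP-Solutions | GeeksforGeeks/Python3/Medium/Neeman's Shoes/neemans-shoes.py | exercise
-- ===== SOURCE A (Python) =====
-- import heapq
-- from collections import defaultdict
--
-- def exercise(N, M, A, src, dest, X):
--     # code here
--     adj = defaultdict(list)
--     for node1, node2, cost in A:
--         adj[node1].append((node2, cost))
--         adj[node2].append((node1, cost))
--     visited = set()
--     heap = [(0, src)]
--     while heap:
--         time, node = heapq.heappop(heap)
--         if node in visited:
--             continue
--         visited.add(node)
--         if time > X:
--             return "Neeman's Wool Joggers"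
--         if node == dest:
--             return "Neeman's Cotton Classics"
--         for target, cost in adj[node]:
--             if not target in visited:
--                 heapq.heappush(heap, (time + cost, target))
-- ===== SOURCE B (Python) =====
-- from collections import defaultdict
--
-- def exercise(N, M, A, src, dest, X):
--     adj = defaultdict(list)
--     for n1, n2, c in A:
--         adj[n1].append((n2, c))
--         adj[n2].append((n1, c))
--     dist = {src: 0}
--     visited = set()
--     while True:
--         u = None
--         du = None
--         for v, d in dist.items():
--             if v in visited:
--                 continue
--             if u is None or (d, v) < (du, u):
--                 u, du = v, d
--         if u is None:
--             return None
--         if du > X: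
--             return "Neeman's Wool Joggers"
--         if u == dest:
--             return "Neeman's Cotton Classics"
--         visited.add(u)
--         for t, c in adj[u]:
--             if t in visited:
--                 continue
--             nd = du + c
--             if t not in dist or nd < dist[t]:
--                 dist[t] = nd
-- ===== Notes on version B (the rewrite author's own statement) =====
-- stated objective: alternative
-- what changed: Replaces the lazy-deletion binary heap of Dijkstra by an explicit tentative-distance table with a repeated linear scan for the unvisited node of minimum (distance, node), relaxing neighbours by in-place table minimum instead of pushing duplicate heap entries.
import Mathlib
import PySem

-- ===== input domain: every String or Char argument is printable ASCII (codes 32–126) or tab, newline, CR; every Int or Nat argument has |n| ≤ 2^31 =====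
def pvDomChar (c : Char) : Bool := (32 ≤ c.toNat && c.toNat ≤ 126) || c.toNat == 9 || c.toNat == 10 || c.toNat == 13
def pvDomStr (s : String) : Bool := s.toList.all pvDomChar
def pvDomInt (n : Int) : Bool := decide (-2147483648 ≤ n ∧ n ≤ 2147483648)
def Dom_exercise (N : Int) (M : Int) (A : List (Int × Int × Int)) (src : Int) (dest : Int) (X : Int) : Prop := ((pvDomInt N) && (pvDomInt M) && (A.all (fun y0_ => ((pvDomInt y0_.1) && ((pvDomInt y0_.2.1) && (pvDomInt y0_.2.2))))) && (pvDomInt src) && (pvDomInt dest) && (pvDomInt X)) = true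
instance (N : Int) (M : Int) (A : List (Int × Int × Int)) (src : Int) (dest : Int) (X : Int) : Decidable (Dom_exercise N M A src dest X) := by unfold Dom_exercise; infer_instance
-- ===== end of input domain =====

-- B replaces A's lazy-deletion binary heap (Dijkstra) by a tentative-distance table with a
-- repeated linear scan for the nearest unvisited node; same return value, similar cost.

-- ===== PORT A =====
-- Python heap tuple order: (time, node) compared lexicographically.
def ltP (a b : Int × Int) : Bool := a.1 < b.1 || (a.1 == b.1 && a.2 < b.2)

-- adj = defaultdict(list); for node1, node2, cost in A: adj[node1].append(...); adj[node2].append(...)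
def buildAdj (A : List (Int × Int × Int)) : PySem.Dict Int (List (Int × Int)) :=
  A.foldl (fun d e =>
    (d.modify e.1 [] (fun l => l ++ [(e.2.1, e.2.2)])).modify e.2.1 [] (fun l => l ++ [(e.1, e.2.2)]))
    PySem.Dict.empty

-- heapq.heappop: remove and return the minimum entry (tuple order); heap kept as a plain list,
-- exact on the observable heap behaviour (multiset of entries + pop-min).
def popMin (h : List (Int × Int)) : Option ((Int × Int) × List (Int × Int)) :=
  match h with
  | [] => none
  | x :: xs =>
    let m := xs.foldl (fun b y => if ltP y b then y else b) x
    some (m, (x :: xs).erase m)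

theorem foldlMin_mem (xs : List (Int × Int)) (x : Int × Int) :
    xs.foldl (fun b y => if ltP y b then y else b) x = x ∨
      xs.foldl (fun b y => if ltP y b then y else b) x ∈ xs := by
  induction xs generalizing x with
  | nil => exact Or.inl rfl
  | cons y ys ih =>
    simp only [List.foldl_cons]
    rcases ih (if ltP y x then y else x) with h | h
    · rw [h]; split
      · exact Or.inr (List.mem_cons_self)
      · exact Or.inl rfl
    · exact Or.inr (List.mem_cons_of_mem _ h)

theorem popMin_length {h : List (Int × Int)} {e : Int × Int} {h' : List (Int × Int)}
    (hp : popMin h = some (e, h')) : h'.length < h.length := by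
  match h with
  | [] => simp [popMin] at hp
  | x :: xs =>
    simp only [popMin, Option.some.injEq, Prod.mk.injEq] at hp
    obtain ⟨he, hh⟩ := hp
    rw [he] at hh
    have hm : e ∈ x :: xs := by
      rcases foldlMin_mem xs x with h1 | h1
      · rw [← he, h1]; exact List.mem_cons_self
      · rw [← he]; exact List.mem_cons_of_mem _ h1
    rw [← hh, List.length_erase_of_mem hm]
    simp

-- while heap: time, node = heappop(heap); if node in visited: continue — the skip loop.
def popUnvisited (vis : PySem.Set Int) (h : List (Int × Int)) :
    Option ((Int × Int) × List (Int × Int)) :=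
  match hm : popMin h with
  | none => none
  | some (e, h') => if PySem.Set.contains vis e.2 then popUnvisited vis h' else some (e, h')
termination_by h.length
decreasing_by exact popMin_length hm

-- the while loop; fuel bounds the number of visits (each visit marks a fresh node, of which
-- there are at most 2*|A|+1, so the fuel below is never exhausted).
def loopA (adj : PySem.Dict Int (List (Int × Int))) (dest X : Int) :
    Nat → PySem.Set Int → List (Int × Int) → Option String
  | 0, _, _ => none
  | Nat.succ fuel, vis, heap =>
    match popUnvisited vis heap with
    | none => none
    | some ((time, node), h') =>
      let vis' := PySem.Set.add vis node
      if X < time then some "Neeman's Wool Joggers"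
      else if node == dest then some "Neeman's Cotton Classics"
      else
        loopA adj dest X fuel vis'
          ((adj.getD node []).foldl
            (fun hp tc => if PySem.Set.contains vis' tc.1 then hp else hp ++ [(time + tc.2, tc.1)])
            h')

def exercise (N : Int) (M : Int) (A : List (Int × Int × Int)) (src : Int) (dest : Int) (X : Int) : Option String :=
  loopA (buildAdj A) dest X (2 * A.length + 2) PySem.Set.empty [(0, src)]

-- ===== PORT B =====
def buildAdjB (A : List (Int × Int × Int)) : PySem.Dict Int (List (Int × Int)) :=
  A.foldl (fun d e =>
    (d.modify e.1 [] (fun l => l ++ [(e.2.1, e.2.2)])).modify e.2.1 [] (fun l => l ++ [(e.1, e.2.2)]))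
    PySem.Dict.empty

-- the linear scan: first unvisited item, then strictly-smaller (d, v) replaces the best.
def selectMin (vis : PySem.Set Int) (dist : PySem.Dict Int Int) : Option (Int × Int) :=
  dist.items.foldl
    (fun best vd =>
      if PySem.Set.contains vis vd.1 then best
      else
        match best with
        | none => some vd
        | some b => if vd.2 < b.2 || (vd.2 == b.2 && vd.1 < b.1) then some vd else best)
    none

-- the while True loop of B; same fuel bound as A's loop (one unit per selection).
def loopB (adj : PySem.Dict Int (List (Int × Int))) (dest X : Int) :
    Nat → PySem.Set Int → PySem.Dict Int Int → Option String
  | 0, _, _ => none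
  | Nat.succ fuel, vis, dist =>
    match selectMin vis dist with
    | none => none
    | some (u, du) =>
      if X < du then some "Neeman's Wool Joggers"
      else if u == dest then some "Neeman's Cotton Classics"
      else
        let vis' := PySem.Set.add vis u
        loopB adj dest X fuel vis'
          ((adj.getD u []).foldl
            (fun dd tc =>
              if PySem.Set.contains vis' tc.1 then dd
              else
                match dd.get? tc.1 with
                | none => dd.insert tc.1 (du + tc.2)
                | some old => if du + tc.2 < old then dd.insert tc.1 (du + tc.2) else dd)
            dist)

def exercise_alt (N : Int) (M : Int) (A : List (Int × Int × Int)) (src : Int) (dest : Int) (X : Int) : Option String :=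
  loopB (buildAdjB A) dest X (2 * A.length + 2) PySem.Set.empty (PySem.Dict.empty.insert src 0)

-- ===== PRECONDITION & SPEC =====
def Spec_exercise (N : Int) (M : Int) (A : List (Int × Int × Int)) (src : Int) (dest : Int) (X : Int) (out : Option String) : Prop := out = exercise_alt N M A src dest X
instance (N : Int) (M : Int) (A : List (Int × Int × Int)) (src : Int) (dest : Int) (X : Int) (out : Option String) : Decidable (Spec_exercise N M A src dest X out) := by unfold Spec_exercise; infer_instance

-- ===== CLAIM (what is proved, stated in full; the proofs are below) =====
def Claim_equal_exercise : Prop := ∀ (N : Int) (M : Int) (A : List (Int × Int × Int)) (src : Int) (dest : Int) (X : Int), Dom_exercise N M A src dest X → Spec_exercise N M A src dest X (exercise N M A src dest X)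

-- ===== LEMMAS AND PROOFS =====

-- minimum tentative time a node currently has in the heap (none = not present)
def minTime (h : List (Int × Int)) (v : Int) : Option Int :=
  ((h.filter (fun e => e.2 == v)).map Prod.fst).min?

-- the simulation invariant between A's heap and B's distance table
def SimInv (vis : PySem.Set Int) (h : List (Int × Int)) (dist : PySem.Dict Int Int) : Prop :=
  dist.keys.Nodup ∧ ∀ v, PySem.Set.contains vis v = false → minTime h v = dist.get? v

theorem ltP_iff (a b : Int × Int) : ltP a b = true ↔ a.1 < b.1 ∨ (a.1 = b.1 ∧ a.2 < b.2) := by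
  simp [ltP]

theorem ltP_false_iff (a b : Int × Int) :
    ltP a b = false ↔ b.1 < a.1 ∨ (b.1 = a.1 ∧ b.2 ≤ a.2) := by
  rw [← Bool.not_eq_true, ltP_iff]; omega

theorem ltP_trans {a b c : Int × Int} (h1 : ltP a b = false) (h2 : ltP b c = false) :
    ltP a c = false := by
  rw [ltP_false_iff] at h1 h2 ⊢; omega

theorem ltP_irrefl (a : Int × Int) : ltP a a = false := by
  rw [ltP_false_iff]; omega

theorem foldlMin_le (xs : List (Int × Int)) (x e : Int × Int) (he : e = x ∨ e ∈ xs) :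
    ltP e (xs.foldl (fun b y => if ltP y b then y else b) x) = false := by
  induction xs generalizing x e with
  | nil =>
    simp only [List.foldl_nil]
    rcases he with heq | hmem
    · subst heq; exact ltP_irrefl e
    · simp at hmem
  | cons y ys ih =>
    simp only [List.foldl_cons]
    have hx' : ltP x (if ltP y x then y else x) = false := by
      by_cases hyx : ltP y x = true
      · rw [if_pos hyx, ltP_false_iff]; rw [ltP_iff] at hyx; omega
      · rw [if_neg hyx]; exact ltP_irrefl x
    have hy' : ltP y (if ltP y x then y else x) = false := by
      by_cases hyx : ltP y x = true
      · rw [if_pos hyx]; exact ltP_irrefl y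
      · rw [if_neg hyx]; rw [Bool.not_eq_true, ltP_false_iff] at hyx
        rw [ltP_false_iff]; omega
    have hr : ltP (if ltP y x then y else x)
        (ys.foldl (fun b y => if ltP y b then y else b) (if ltP y x then y else x)) = false :=
      ih (if ltP y x then y else x) _ (Or.inl rfl)
    rcases he with heq | hmem
    · subst heq; exact ltP_trans hx' hr
    · rcases List.mem_cons.mp hmem with heq | h2
      · subst heq; exact ltP_trans hy' hr
      · exact ih _ _ (Or.inr h2)

theorem popMin_spec {h : List (Int × Int)} {m : Int × Int} {h' : List (Int × Int)}
    (hp : popMin h = some (m, h')) :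
    m ∈ h ∧ h' = h.erase m ∧ ∀ e ∈ h, ltP e m = false := by
  match h with
  | [] => simp [popMin] at hp
  | x :: xs =>
    simp only [popMin, Option.some.injEq, Prod.mk.injEq] at hp
    obtain ⟨he, hh⟩ := hp
    rw [he] at hh
    refine ⟨?_, hh.symm, ?_⟩
    · rcases foldlMin_mem xs x with h1 | h1
      · rw [← he, h1]; exact List.mem_cons_self
      · rw [← he]; exact List.mem_cons_of_mem _ h1
    · intro e hme
      rw [← he]
      rcases List.mem_cons.mp hme with rfl | h2
      · exact foldlMin_le xs e e (Or.inl rfl)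
      · exact foldlMin_le xs x e (Or.inr h2)

theorem filter_erase_of_neg {p : Int × Int → Bool} {a : Int × Int} (ha : p a = false) :
    ∀ l : List (Int × Int), (l.erase a).filter p = l.filter p := by
  intro l
  induction l with
  | nil => rfl
  | cons x xs ih =>
    rw [List.erase_cons]
    by_cases hx : x = a
    · subst hx
      rw [if_pos (by simp), List.filter_cons, if_neg (by simp [ha])]
    · rw [if_neg (by simp [hx]), List.filter_cons, List.filter_cons, ih]

theorem popMin_none_iff (h : List (Int × Int)) : popMin h = none ↔ h = [] := by
  cases h <;> simp [popMin]

theorem popUnvisited_none_iff (vis : PySem.Set Int) (h : List (Int × Int)) :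
    popUnvisited vis h = none ↔ ∀ e ∈ h, PySem.Set.contains vis e.2 = true := by
  induction h using popUnvisited.induct (vis := vis) with
  | case1 x hm =>
    have hx := (popMin_none_iff x).mp hm
    subst hx
    rw [popUnvisited]
    split
    · simp
    · rename_i e h' heq
      rw [heq] at hm; exact absurd hm (by simp)
  | case2 x e h' hm hv ih =>
    obtain ⟨hmem, herase, hmin⟩ := popMin_spec hm
    rw [popUnvisited]
    split
    · rename_i heq
      rw [heq] at hm; exact absurd hm (by simp)
    · rename_i e1 h1 heq
      rw [hm] at heq
      obtain ⟨he1, hh1⟩ := Prod.mk.inj (Option.some.inj heq)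
      subst he1; subst hh1
      rw [if_pos hv, ih]
      constructor
      · intro hall f hfx
        by_cases hfe : f = e
        · rw [hfe]; exact hv
        · refine hall f ?_
          rw [herase]
          exact (List.mem_erase_of_ne hfe).mpr hfx
      · intro hall f hf
        refine hall f ?_
        rw [herase] at hf
        exact (List.erase_sublist).subset hf
  | case3 x e h' hm hv =>
    obtain ⟨hmem, herase, hmin⟩ := popMin_spec hm
    rw [popUnvisited]
    split
    · rename_i heq
      rw [heq] at hm; exact absurd hm (by simp)
    · rename_i e1 h1 heq
      rw [hm] at heq
      obtain ⟨he1, hh1⟩ := Prod.mk.inj (Option.some.inj heq)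
      subst he1; subst hh1
      rw [if_neg hv]
      simp only [Bool.not_eq_true] at hv
      constructor
      · intro hc; exact absurd hc (by simp)
      · intro hall
        have hc := hall e hmem
        rw [hv] at hc
        exact absurd hc (by simp)

theorem popUnvisited_spec (vis : PySem.Set Int) (h : List (Int × Int)) (t v : Int)
    (hout : List (Int × Int)) (hp : popUnvisited vis h = some ((t, v), hout)) :
    (t, v) ∈ h ∧ PySem.Set.contains vis v = false ∧
      (∀ e ∈ h, PySem.Set.contains vis e.2 = false → ltP e (t, v) = false) ∧
      (∀ w, PySem.Set.contains vis w = false → w ≠ v →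
        hout.filter (fun e => e.2 == w) = h.filter (fun e => e.2 == w)) := by
  induction h using popUnvisited.induct (vis := vis) generalizing hout with
  | case1 x hm =>
    rw [popUnvisited] at hp
    split at hp
    · exact absurd hp (by simp)
    · rename_i e h1 heq
      rw [heq] at hm; exact absurd hm (by simp)
  | case2 x e h1 hm hv ih =>
    obtain ⟨hmem, herase, hmin⟩ := popMin_spec hm
    rw [popUnvisited] at hp
    split at hp
    · rename_i heq
      rw [heq] at hm; exact absurd hm (by simp)
    · rename_i e1 h2 heq
      rw [hm] at heq
      obtain ⟨he1, hh1⟩ := Prod.mk.inj (Option.some.inj heq)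
      subst he1; subst hh1
      rw [if_pos hv] at hp
      obtain ⟨ih1, ih2, ih3, ih4⟩ := ih _ hp
      have hsub : ∀ f ∈ h1, f ∈ x := by
        intro f hf
        rw [herase] at hf
        exact (List.erase_sublist).subset hf
      refine ⟨hsub _ ih1, ih2, ?_, ?_⟩
      · intro f hf hfv
        have hfe : f ≠ e := by
          intro hfe
          rw [hfe] at hfv
          rw [hv] at hfv
          exact absurd hfv (by simp)
        refine ih3 f ?_ hfv
        rw [herase]
        exact (List.mem_erase_of_ne hfe).mpr hf
      · intro w hw hwv
        have he2 : e.2 ≠ w := by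
          intro hew
          rw [hew] at hv
          rw [hv] at hw
          exact absurd hw (by simp)
        rw [ih4 w hw hwv, herase, filter_erase_of_neg (by simp [he2]) x]
  | case3 x e h1 hm hv =>
    obtain ⟨hmem, herase, hmin⟩ := popMin_spec hm
    rw [popUnvisited] at hp
    split at hp
    · rename_i heq
      rw [heq] at hm; exact absurd hm (by simp)
    · rename_i e1 h2 heq
      rw [hm] at heq
      obtain ⟨he1, hh1⟩ := Prod.mk.inj (Option.some.inj heq)
      subst he1; subst hh1
      rw [if_neg hv] at hp
      obtain ⟨hev, hho⟩ := Prod.mk.inj (Option.some.inj hp)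
      rw [Bool.not_eq_true] at hv
      subst hev
      subst hho
      refine ⟨hmem, by simpa using hv, fun f hf _ => hmin f hf, ?_⟩
      intro w hw hwv
      rw [herase]
      refine filter_erase_of_neg ?_ x
      simp [Ne.symm hwv]


theorem minTime_eq_some {h : List (Int × Int)} {t v : Int} (hm : (t, v) ∈ h)
    (hmin : ∀ e ∈ h, e.2 = v → t ≤ e.1) : minTime h v = some t := by
  unfold minTime
  rw [List.min?_eq_some_iff]
  constructor
  · exact List.mem_map.mpr ⟨(t, v), List.mem_filter.mpr ⟨hm, by simp⟩, rfl⟩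
  · intro b hb
    obtain ⟨e, hef, hfst⟩ := List.mem_map.mp hb
    obtain ⟨heh, hev⟩ := List.mem_filter.mp hef
    rw [← hfst]
    exact hmin e heh (by simpa using hev)

theorem minTime_mem {h : List (Int × Int)} {t v : Int} (hm : minTime h v = some t) :
    (t, v) ∈ h := by
  unfold minTime at hm
  obtain ⟨hmem, -⟩ := List.min?_eq_some_iff.mp hm
  obtain ⟨e, hef, hfst⟩ := List.mem_map.mp hmem
  obtain ⟨heh, hev⟩ := List.mem_filter.mp hef
  have : e = (t, v) := by
    obtain ⟨e1, e2⟩ := e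
    simp at hev hfst
    simp [hev, hfst]
  rwa [this] at heh

theorem minTime_append_ne {tg w : Int} (hne : tg ≠ w) (hp : List (Int × Int)) (c : Int) :
    minTime (hp ++ [(c, tg)]) w = minTime hp w := by
  unfold minTime
  rw [List.filter_append]
  have : ([((c : Int), tg)].filter (fun e => e.2 == w)) = [] := by simp [hne]
  rw [this, List.append_nil]

theorem min?_concat (l : List Int) (c : Int) :
    (l ++ [c]).min? = some (l.min?.elim c (fun m => min m c)) := by
  induction l with
  | nil => simp [List.min?]
  | cons a l ih =>
    rw [List.cons_append, List.min?_cons, List.min?_cons, ih]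
    cases hl : l.min? with
    | none => simp
    | some m => simp [min_assoc]

theorem minTime_append_self (hp : List (Int × Int)) (c tg : Int) :
    minTime (hp ++ [(c, tg)]) tg =
      some (match minTime hp tg with | none => c | some m => min m c) := by
  unfold minTime
  rw [List.filter_append]
  have h1 : ([((c : Int), tg)].filter (fun e => e.2 == tg)) = [(c, tg)] := by simp
  rw [h1, List.map_append, List.map_cons, List.map_nil, min?_concat]
  cases hm : ((hp.filter (fun e => e.2 == tg)).map Prod.fst).min? <;> simp

-- the fold step of selectMin
def selStep (vis : PySem.Set Int) (best : Option (Int × Int)) (vd : Int × Int) :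
    Option (Int × Int) :=
  if PySem.Set.contains vis vd.1 then best
  else
    match best with
    | none => some vd
    | some b => if vd.2 < b.2 || (vd.2 == b.2 && vd.1 < b.1) then some vd else best

theorem selectMin_eq_fold (vis : PySem.Set Int) (dist : PySem.Dict Int Int) :
    selectMin vis dist = dist.items.foldl (selStep vis) none := rfl

theorem not_mem_of_contains_false {vis : PySem.Set Int} {x : Int}
    (h : PySem.Set.contains vis x = false) : x ∉ vis := by
  intro hm
  have := (PySem.Set.contains_iff vis x).mpr hm
  rw [h] at this
  exact Bool.false_ne_true this

theorem selStep_isSome {vis : PySem.Set Int} {acc : Option (Int × Int)} {p : Int × Int}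
    (hv : PySem.Set.contains vis p.1 = false) : ∃ b, selStep vis acc p = some b := by
  cases acc with
  | none => exact ⟨p, by simp [selStep, not_mem_of_contains_false hv]⟩
  | some a =>
    by_cases hc : p.2 < a.2 ∨ (p.2 = a.2 ∧ p.1 < a.1)
    · exact ⟨p, by simp [selStep, not_mem_of_contains_false hv, hc]⟩
    · exact ⟨a, by simp [selStep, not_mem_of_contains_false hv, hc]⟩

theorem mem_of_contains_true {vis : PySem.Set Int} {x : Int}
    (h : PySem.Set.contains vis x = true) : x ∈ vis :=
  (PySem.Set.contains_iff vis x).mp h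

theorem selStep_visited {vis : PySem.Set Int} {acc : Option (Int × Int)} {p : Int × Int}
    (hv : PySem.Set.contains vis p.1 = true) : selStep vis acc p = acc := by
  simp [selStep, mem_of_contains_true hv]

theorem selFold_none_iff (vis : PySem.Set Int) (l : List (Int × Int)) (acc : Option (Int × Int)) :
    l.foldl (selStep vis) acc = none ↔
      acc = none ∧ ∀ p ∈ l, PySem.Set.contains vis p.1 = true := by
  induction l generalizing acc with
  | nil => simp
  | cons p ps ih =>
    rw [List.foldl_cons, ih]
    by_cases hv : PySem.Set.contains vis p.1 = true
    · rw [selStep_visited hv]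
      simp [mem_of_contains_true hv]
    · rw [Bool.not_eq_true] at hv
      obtain ⟨b, hbs⟩ := selStep_isSome (acc := acc) hv
      constructor
      · rintro ⟨hnone, -⟩
        rw [hbs] at hnone
        exact absurd hnone (by simp)
      · rintro ⟨-, hall⟩
        have := hall p List.mem_cons_self
        rw [hv] at this
        exact absurd this (by simp)

theorem selFold_mem (vis : PySem.Set Int) (l : List (Int × Int)) (acc : Option (Int × Int))
    (b : Int × Int) (hb : l.foldl (selStep vis) acc = some b) :
    acc = some b ∨ (b ∈ l ∧ PySem.Set.contains vis b.1 = false) := by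
  induction l generalizing acc with
  | nil => exact Or.inl hb
  | cons p ps ih =>
    rw [List.foldl_cons] at hb
    rcases ih (selStep vis acc p) hb with hacc | hmem
    · by_cases hv : PySem.Set.contains vis p.1 = true
      · rw [selStep_visited hv] at hacc
        exact Or.inl hacc
      · rw [Bool.not_eq_true] at hv
        cases acc with
        | none =>
          have : selStep vis none p = some p := by simp [selStep, not_mem_of_contains_false hv]
          rw [this] at hacc
          obtain rfl := Option.some.inj hacc
          exact Or.inr ⟨List.mem_cons_self, hv⟩
        | some a =>
          by_cases hc : p.2 < a.2 ∨ (p.2 = a.2 ∧ p.1 < a.1)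
          · have : selStep vis (some a) p = some p := by simp [selStep, not_mem_of_contains_false hv, hc]
            rw [this] at hacc
            obtain rfl := Option.some.inj hacc
            exact Or.inr ⟨List.mem_cons_self, hv⟩
          · have : selStep vis (some a) p = some a := by simp [selStep, not_mem_of_contains_false hv, hc]
            rw [this] at hacc
            exact Or.inl hacc
    · exact Or.inr ⟨List.mem_cons_of_mem _ hmem.1, hmem.2⟩

theorem selFold_min (vis : PySem.Set Int) (l : List (Int × Int)) (acc : Option (Int × Int))
    (b : Int × Int) (hb : l.foldl (selStep vis) acc = some b) :
    (∀ p ∈ l, PySem.Set.contains vis p.1 = false → ltP (p.2, p.1) (b.2, b.1) = false) ∧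
      (∀ a, acc = some a → ltP (a.2, a.1) (b.2, b.1) = false) := by
  induction l generalizing acc with
  | nil =>
    refine ⟨by simp, ?_⟩
    intro a ha
    rw [List.foldl_nil] at hb
    rw [hb] at ha
    obtain rfl := Option.some.inj ha
    exact ltP_irrefl _
  | cons p ps ih =>
    rw [List.foldl_cons] at hb
    obtain ⟨H1, H2⟩ := ih (selStep vis acc p) hb
    have hpcase : PySem.Set.contains vis p.1 = false → ltP (p.2, p.1) (b.2, b.1) = false := by
      intro hv
      cases acc with
      | none =>
        exact H2 p (by simp [selStep, not_mem_of_contains_false hv])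
      | some a =>
        by_cases hc : p.2 < a.2 ∨ (p.2 = a.2 ∧ p.1 < a.1)
        · exact H2 p (by simp [selStep, not_mem_of_contains_false hv, hc])
        · have ha := H2 a (by simp [selStep, not_mem_of_contains_false hv, hc])
          have hc' : ltP (p.2, p.1) (a.2, a.1) = false := by
            rw [ltP_false_iff]; omega
          exact ltP_trans hc' ha
    refine ⟨?_, ?_⟩
    · intro q hq hqv
      rcases List.mem_cons.mp hq with rfl | hq2
      · exact hpcase hqv
      · exact H1 q hq2 hqv
    · intro a0 ha0
      subst ha0
      by_cases hv : PySem.Set.contains vis p.1 = true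
      · exact H2 a0 (by rw [selStep_visited hv])
      · rw [Bool.not_eq_true] at hv
        by_cases hc : p.2 < a0.2 ∨ (p.2 = a0.2 ∧ p.1 < a0.1)
        · have hp := H2 p (by simp [selStep, not_mem_of_contains_false hv, hc])
          rw [ltP_false_iff] at hp ⊢
          omega
        · exact H2 a0 (by simp [selStep, not_mem_of_contains_false hv, hc])

theorem contains_add_false {vis : PySem.Set Int} {v w : Int} :
    PySem.Set.contains (PySem.Set.add vis v) w = false ↔
      PySem.Set.contains vis w = false ∧ w ≠ v := by
  have h1 := PySem.Set.contains_iff (PySem.Set.add vis v) w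
  have h2 := PySem.Set.contains_iff vis w
  have h3 := PySem.Set.mem_add vis v w
  constructor
  · intro hf
    have hnm : ¬ (w ∈ vis ∨ w = v) := by
      rw [← h3, ← h1, hf]; simp
    simp only [not_or] at hnm
    refine ⟨?_, hnm.2⟩
    rw [← Bool.not_eq_true, h2]; exact hnm.1
  · rintro ⟨hf, hne⟩
    rw [← Bool.not_eq_true, h1, h3]
    rintro (hm | hm)
    · have := h2.mpr hm
      rw [hf] at this
      exact Bool.false_ne_true this
    · exact hne hm

theorem relax_inv (vis' : PySem.Set Int) (t : Int) (L : List (Int × Int)) :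
    ∀ (hp : List (Int × Int)) (dd : PySem.Dict Int Int), dd.keys.Nodup →
      (∀ w, PySem.Set.contains vis' w = false → minTime hp w = dd.get? w) →
      (L.foldl (fun dd tc =>
          if PySem.Set.contains vis' tc.1 then dd
          else
            match dd.get? tc.1 with
            | none => dd.insert tc.1 (t + tc.2)
            | some old => if t + tc.2 < old then dd.insert tc.1 (t + tc.2) else dd)
        dd).keys.Nodup ∧
      ∀ w, PySem.Set.contains vis' w = false →
        minTime (L.foldl (fun hp tc =>
            if PySem.Set.contains vis' tc.1 then hp else hp ++ [(t + tc.2, tc.1)]) hp) w =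
          (L.foldl (fun dd tc =>
            if PySem.Set.contains vis' tc.1 then dd
            else
              match dd.get? tc.1 with
              | none => dd.insert tc.1 (t + tc.2)
              | some old => if t + tc.2 < old then dd.insert tc.1 (t + tc.2) else dd)
          dd).get? w := by
  induction L with
  | nil =>
    intro hp dd hnd hinv
    exact ⟨hnd, hinv⟩
  | cons tc L ih =>
    intro hp dd hnd hinv
    simp only [List.foldl_cons]
    by_cases hv : PySem.Set.contains vis' tc.1 = true
    · rw [if_pos hv, if_pos hv]
      exact ih hp dd hnd hinv
    · rw [Bool.not_eq_true] at hv
      rw [if_neg (by rw [hv]; simp), if_neg (by rw [hv]; simp)]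
      have hddv : minTime hp tc.1 = dd.get? tc.1 := hinv tc.1 hv
      cases hdd : dd.get? tc.1 with
      | none =>
        simp only []
        refine ih _ _ (PySem.Dict.nodup_keys_insert _ _ _ hnd) ?_
        intro w hw
        by_cases hwt : w = tc.1
        · subst hwt
          rw [minTime_append_self, PySem.Dict.get?_insert_self]
          rw [hddv, hdd]
        · rw [minTime_append_ne (fun hh => hwt hh.symm), PySem.Dict.get?_insert_of_ne _ _ hwt]
          exact hinv w hw
      | some old =>
        simp only []
        by_cases hlt : t + tc.2 < old
        · rw [if_pos hlt]
          refine ih _ _ (PySem.Dict.nodup_keys_insert _ _ _ hnd) ?_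
          intro w hw
          by_cases hwt : w = tc.1
          · subst hwt
            rw [minTime_append_self, PySem.Dict.get?_insert_self, hddv, hdd]
            simp only [Option.some.injEq, min_def]
            split_ifs with hle
            · exact le_antisymm hle hlt.le
            · rfl
          · rw [minTime_append_ne (fun hh => hwt hh.symm), PySem.Dict.get?_insert_of_ne _ _ hwt]
            exact hinv w hw
        · rw [if_neg hlt]
          refine ih _ _ hnd ?_
          intro w hw
          by_cases hwt : w = tc.1
          · subst hwt
            rw [minTime_append_self, hddv, hdd]
            simp only [Option.some.injEq, min_def]
            split_ifs <;> omega
          · rw [minTime_append_ne (fun hh => hwt hh.symm)]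
            exact hinv w hw

theorem loop_eq (adj : PySem.Dict Int (List (Int × Int))) (dest X : Int) :
    ∀ (fuel : Nat) (vis : PySem.Set Int) (h : List (Int × Int)) (dist : PySem.Dict Int Int),
      SimInv vis h dist → loopA adj dest X fuel vis h = loopB adj dest X fuel vis dist := by
  intro fuel
  induction fuel with
  | zero => intro vis h dist _; rfl
  | succ fuel ih =>
    rintro vis h dist ⟨hnd, hinv⟩
    rw [loopA, loopB]
    cases hpu : popUnvisited vis h with
    | none =>
      have hall := (popUnvisited_none_iff vis h).mp hpu
      have hsel : selectMin vis dist = none := by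
        rw [selectMin_eq_fold, selFold_none_iff]
        refine ⟨rfl, ?_⟩
        intro p hpitems
        by_contra hc
        rw [Bool.not_eq_true] at hc
        have hg : dist.get? p.1 = some p.2 :=
          PySem.Dict.get?_of_mem_items _ (by rwa [Prod.mk.eta]) hnd
        have hmt : minTime h p.1 = some p.2 := by rw [hinv p.1 hc]; exact hg
        have hentry := minTime_mem hmt
        have habs := hall _ hentry
        rw [hc] at habs
        exact Bool.false_ne_true habs
      rw [hsel]
    | some pr =>
      obtain ⟨⟨t, v⟩, h'⟩ := pr
      obtain ⟨hmem, hunv, hmin, hfilt⟩ := popUnvisited_spec vis h t v h' hpu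
      have hmtv : minTime h v = some t := by
        refine minTime_eq_some hmem ?_
        intro e he hev
        have hl := hmin e he (by rw [hev]; exact hunv)
        rw [ltP_false_iff] at hl
        omega
      have hgv : dist.get? v = some t := by rw [← hinv v hunv]; exact hmtv
      have hvt_items : (v, t) ∈ dist.items := PySem.Dict.mem_items_of_get?_eq_some _ hgv
      have hsel : selectMin vis dist = some (v, t) := by
        cases hs : selectMin vis dist with
        | none =>
          rw [selectMin_eq_fold] at hs
          obtain ⟨-, hall⟩ := (selFold_none_iff vis dist.items none).mp hs
          have habs := hall (v, t) hvt_items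
          rw [hunv] at habs
          exact absurd habs (by simp)
        | some b =>
          obtain ⟨b1, b2⟩ := b
          rw [selectMin_eq_fold] at hs
          rcases selFold_mem vis dist.items none (b1, b2) hs with habs | ⟨hbmem, hbunv⟩
          · exact absurd habs (by simp)
          obtain ⟨hBmin, -⟩ := selFold_min vis dist.items none (b1, b2) hs
          have hgb : dist.get? b1 = some b2 := PySem.Dict.get?_of_mem_items _ hbmem hnd
          have hmb : minTime h b1 = some b2 := by rw [hinv b1 hbunv]; exact hgb
          have hbentry := minTime_mem hmb
          have h1 := hmin _ hbentry hbunv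
          have h2 := hBmin (v, t) hvt_items hunv
          rw [ltP_false_iff] at h1 h2
          simp only at h1 h2
          have hb1 : b1 = v := by omega
          have hb2 : b2 = t := by omega
          rw [hb1, hb2]
      rw [hsel]
      simp only []
      by_cases hX : X < t
      · rw [if_pos hX, if_pos hX]
      · rw [if_neg hX, if_neg hX]
        by_cases hd : (v == dest) = true
        · rw [if_pos hd, if_pos hd]
        · rw [if_neg hd, if_neg hd]
          have hinv' : ∀ w, PySem.Set.contains (PySem.Set.add vis v) w = false →
              minTime h' w = dist.get? w := by
            intro w hw
            obtain ⟨hw1, hw2⟩ := contains_add_false.mp hw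
            unfold minTime
            rw [hfilt w hw1 hw2]
            exact hinv w hw1
          obtain ⟨hnd2, hpt⟩ :=
            relax_inv (PySem.Set.add vis v) t (adj.getD v []) h' dist hnd hinv'
          exact ih _ _ _ ⟨hnd2, hpt⟩

-- ===== VERDICT (by name: the statement is the Claim_ definition above) =====
theorem exercise_spec : Claim_equal_exercise := by
  intro N M A src dest X _
  unfold Spec_exercise exercise exercise_alt
  have hadj : buildAdjB A = buildAdj A := rfl
  rw [hadj]
  apply loop_eq
  refine ⟨?_, ?_⟩
  · exact PySem.Dict.nodup_keys_insert _ _ _ PySem.Dict.nodup_keys_empty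
  · intro v hv
    by_cases hvs : v = src
    · subst hvs
      simp [minTime, PySem.Dict.get?_insert_self, List.min?]
    · rw [PySem.Dict.get?_insert_of_ne _ _ hvs]
      simp [minTime, PySem.Dict.get?_empty, Ne.symm hvs]
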